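-- pv_equiv track=rewrite | github.com/xKonnichiwa/rats_activity | backend/server/annotation_utils.py | process_annotations_to_pairs
-- ===== SOURCE A (Python) =====
-- def process_annotations_to_pairs(annotations):
--     """
--     Преобразует список аннотаций в пары для каждого типа.
--     Возвращает словарь с ключами 'is', 'swd', 'ds' и списками пар.
--     """
--     annotation_types = ['is', 'swd', 'ds']
--     annotations_dict = {atype: [] for atype in annotation_types}
--
--     for atype in annotation_types:
--         pairs = []
--         temp_pair = {}
--         for ann in annotations:
--             onset, duration, description = ann
--             if description == f"{atype}1":
--                 temp_pair['start'] = onset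
--             elif description == f"{atype}2":
--                 temp_pair['end'] = onset
--                 if 'start' in temp_pair:
--                     pairs.append(temp_pair)
--                     temp_pair = {}
--         annotations_dict[atype] = pairs
--     return annotations_dict
-- ===== SOURCE B (Python) =====
-- _ROLE_MAP = {
--     'is1': ('is', 'start'), 'is2': ('is', 'end'),
--     'swd1': ('swd', 'start'), 'swd2': ('swd', 'end'),
--     'ds1': ('ds', 'start'), 'ds2': ('ds', 'end'),
-- }
--
--
-- def _step(state, role, onset):
--     """Advance one type's (pairs, temp_pair) state by one classified annotation."""
--     pairs, temp = state
--     if role == 'start':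
--         temp = dict(temp)
--         temp['start'] = onset
--         return pairs, temp
--     temp = dict(temp)
--     temp['end'] = onset
--     if 'start' in temp:
--         return pairs + [temp], {}
--     return pairs, temp
--
--
-- def process_annotations_to_pairs(annotations):
--     """Single pass: classify each annotation via a static description map and
--     feed it to the matching type's independent pairing state."""
--     s_is = ([], {})
--     s_swd = ([], {})
--     s_ds = ([], {})
--     for onset, _duration, description in annotations:
--         tr = _ROLE_MAP.get(description)
--         if tr is None:
--             continue
--         atype, role = tr
--         if atype == 'is':
--             s_is = _step(s_is, role, onset)
--         elif atype == 'swd':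
--             s_swd = _step(s_swd, role, onset)
--         else:
--             s_ds = _step(s_ds, role, onset)
--     return {'is': s_is[0], 'swd': s_swd[0], 'ds': s_ds[0]}
-- ===== Notes on version B (the rewrite author's own statement) =====
-- stated objective: alternative
-- what changed: A scans the whole annotation list once per type (three passes, comparing against strings built per type); B makes a single pass, classifying each annotation with a static description->(type,role) map and maintaining three independent per-type pairing states.
import Mathlib
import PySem

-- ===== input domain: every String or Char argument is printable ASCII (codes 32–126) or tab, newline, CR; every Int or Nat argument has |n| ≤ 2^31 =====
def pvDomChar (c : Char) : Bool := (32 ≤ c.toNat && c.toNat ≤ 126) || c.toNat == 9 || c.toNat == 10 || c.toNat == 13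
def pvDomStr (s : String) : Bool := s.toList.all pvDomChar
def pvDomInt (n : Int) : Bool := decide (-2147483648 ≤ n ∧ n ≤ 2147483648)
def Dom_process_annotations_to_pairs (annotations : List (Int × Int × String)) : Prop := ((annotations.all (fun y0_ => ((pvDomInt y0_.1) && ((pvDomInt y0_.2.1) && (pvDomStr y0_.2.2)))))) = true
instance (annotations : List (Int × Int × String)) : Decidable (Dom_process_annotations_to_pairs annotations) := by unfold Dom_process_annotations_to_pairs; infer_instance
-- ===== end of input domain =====

-- B replaces A's three passes (one per annotation type) by a single pass that classifies each
-- annotation with a static description → (type, role) map; objective: alternative (one traversal instead of three).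


-- ===== PORT A =====
-- inner loop body of A, for a fixed atype: state = (pairs, temp_pair)
def pvStepA (atype : String) (s : List (List (String × Int)) × PySem.Dict String Int)
    (ann : Int × Int × String) : List (List (String × Int)) × PySem.Dict String Int :=
  let onset := ann.1
  let description := ann.2.2
  if description == atype ++ "1" then (s.1, s.2.insert "start" onset)
  else if description == atype ++ "2" then
    let t := s.2.insert "end" onset
    if t.contains "start" then (s.1 ++ [t.items], PySem.Dict.empty)
    else (s.1, t)
  else s

def process_annotations_to_pairs (annotations : List (Int × Int × String)) : List (String × List (List (String × Int))) :=
  let annotation_types := ["is", "swd", "ds"]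
  let annotations_dict : PySem.Dict String (List (List (String × Int))) :=
    annotation_types.foldl (fun d atype => d.insert atype []) PySem.Dict.empty
  let final := annotation_types.foldl
    (fun d atype =>
      d.insert atype (annotations.foldl (pvStepA atype) ([], PySem.Dict.empty)).1)
    annotations_dict
  final.items

-- ===== PORT B =====
def pvRoleMap : PySem.Dict String (String × String) :=
  PySem.Dict.ofList [("is1", ("is", "start")), ("is2", ("is", "end")),
                     ("swd1", ("swd", "start")), ("swd2", ("swd", "end")),
                     ("ds1", ("ds", "start")), ("ds2", ("ds", "end"))]

-- _step of Source B
def pvStepB (s : List (List (String × Int)) × PySem.Dict String Int) (role : String)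
    (onset : Int) : List (List (String × Int)) × PySem.Dict String Int :=
  if role == "start" then (s.1, s.2.insert "start" onset)
  else
    let t := s.2.insert "end" onset
    if t.contains "start" then (s.1 ++ [t.items], PySem.Dict.empty)
    else (s.1, t)

def pvStateB :=
  (List (List (String × Int)) × PySem.Dict String Int) ×
  (List (List (String × Int)) × PySem.Dict String Int) ×
  (List (List (String × Int)) × PySem.Dict String Int)

def pvLoopB (σ : pvStateB) (ann : Int × Int × String) : pvStateB :=
  let onset := ann.1
  let description := ann.2.2
  match pvRoleMap.get? description with
  | none => σ
  | some (atype, role) =>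
    if atype == "is" then (pvStepB σ.1 role onset, σ.2.1, σ.2.2)
    else if atype == "swd" then (σ.1, pvStepB σ.2.1 role onset, σ.2.2)
    else (σ.1, σ.2.1, pvStepB σ.2.2 role onset)

def process_annotations_to_pairs_alt (annotations : List (Int × Int × String)) : List (String × List (List (String × Int))) :=
  let st := annotations.foldl pvLoopB
    (([], PySem.Dict.empty), ([], PySem.Dict.empty), ([], PySem.Dict.empty))
  [("is", st.1.1), ("swd", st.2.1.1), ("ds", st.2.2.1)]

-- ===== PRECONDITION & SPEC =====
def Spec_process_annotations_to_pairs (annotations : List (Int × Int × String)) (out : List (String × List (List (String × Int)))) : Prop := out = process_annotations_to_pairs_alt annotations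
instance (annotations : List (Int × Int × String)) (out : List (String × List (List (String × Int)))) : Decidable (Spec_process_annotations_to_pairs annotations out) := by unfold Spec_process_annotations_to_pairs; infer_instance

-- ===== CLAIM (what is proved, stated in full; the proofs are below) =====
def Claim_equal_process_annotations_to_pairs : Prop := ∀ (annotations : List (Int × Int × String)), Dom_process_annotations_to_pairs annotations → Spec_process_annotations_to_pairs annotations (process_annotations_to_pairs annotations)

-- ===== LEMMAS AND PROOFS =====

-- one B step equals the triple of A steps (case analysis on the six descriptions)
theorem pvLoopB_eq (σ : pvStateB) (ann : Int × Int × String) :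
    pvLoopB σ ann = (pvStepA "is" σ.1 ann, pvStepA "swd" σ.2.1 ann, pvStepA "ds" σ.2.2 ann) := by
  obtain ⟨onset, dur, desc⟩ := ann
  obtain ⟨⟨pa, ta⟩, ⟨pb, tb⟩, ⟨pc, tc⟩⟩ := σ
  by_cases h1 : desc = "is1"
  · subst h1; rfl
  by_cases h2 : desc = "is2"
  · subst h2; rfl
  by_cases h3 : desc = "swd1"
  · subst h3; rfl
  by_cases h4 : desc = "swd2"
  · subst h4; rfl
  by_cases h5 : desc = "ds1"
  · subst h5; rfl
  by_cases h6 : desc = "ds2"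
  · subst h6; rfl
  · simp [pvLoopB, pvStepA, pvRoleMap, PySem.Dict.ofList, PySem.Dict.get?, PySem.Dict.update,
      PySem.Dict.empty, PySem.Dict.insert, List.find?,
      h1, h2, h3, h4, h5, h6,
      beq_eq_false_iff_ne.mpr (Ne.symm h1), beq_eq_false_iff_ne.mpr (Ne.symm h2), beq_eq_false_iff_ne.mpr (Ne.symm h3),
      beq_eq_false_iff_ne.mpr (Ne.symm h4), beq_eq_false_iff_ne.mpr (Ne.symm h5),
      beq_eq_false_iff_ne.mpr (Ne.symm h6)]

theorem pvFold_eq (annotations : List (Int × Int × String)) (σ : pvStateB) :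
    annotations.foldl pvLoopB σ =
      (annotations.foldl (pvStepA "is") σ.1,
       annotations.foldl (pvStepA "swd") σ.2.1,
       annotations.foldl (pvStepA "ds") σ.2.2) := by
  induction annotations generalizing σ with
  | nil => rfl
  | cons a l ih => simp only [List.foldl_cons, pvLoopB_eq, ih]

-- ===== VERDICT (by name: the statement is the Claim_ definition above) =====
theorem process_annotations_to_pairs_spec : Claim_equal_process_annotations_to_pairs := by
  intro annotations _
  unfold Spec_process_annotations_to_pairs process_annotations_to_pairs process_annotations_to_pairs_alt
  rw [pvFold_eq]
  simp [List.foldl, PySem.Dict.insert, PySem.Dict.empty]
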